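-- pv_equiv track=rewrite | github.com/itsapi/album-destroyer | background.py | image_diff
-- ===== SOURCE A (Python) =====
-- def image_diff(image):
--     diff = {}
--     prev_row = {}
--     for dy, row in enumerate(image[::-1]):
--         diff[len(image) - dy - 1] = {}
--         for dx, col in enumerate(row):
--             if not prev_row.get(dx) == col:
--                 prev_row[dx] = diff[len(image) - dy - 1][dx] = col
--     return diff
-- ===== SOURCE B (Python) =====
-- def image_diff(image):
--     def below(r, c):
--         # value of the nearest row below r that actually has column c, else None
--         return next((row[c] for row in image[r + 1:] if c < len(row)), None)
--     return {r: {c: v for c, v in enumerate(row) if v != below(r, c)}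
--             for r, row in reversed(list(enumerate(image)))}
-- ===== Notes on version B (the rewrite author's own statement) =====
-- stated objective: simpler
-- what changed: Replaces A's row-major scan that threads a mutable prev_row dict across reversed-enumerate bookkeeping with a stateless per-cell rule: keep a cell iff its value differs from the nearest lower row that has that column, built as one dict comprehension.
import Mathlib
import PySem

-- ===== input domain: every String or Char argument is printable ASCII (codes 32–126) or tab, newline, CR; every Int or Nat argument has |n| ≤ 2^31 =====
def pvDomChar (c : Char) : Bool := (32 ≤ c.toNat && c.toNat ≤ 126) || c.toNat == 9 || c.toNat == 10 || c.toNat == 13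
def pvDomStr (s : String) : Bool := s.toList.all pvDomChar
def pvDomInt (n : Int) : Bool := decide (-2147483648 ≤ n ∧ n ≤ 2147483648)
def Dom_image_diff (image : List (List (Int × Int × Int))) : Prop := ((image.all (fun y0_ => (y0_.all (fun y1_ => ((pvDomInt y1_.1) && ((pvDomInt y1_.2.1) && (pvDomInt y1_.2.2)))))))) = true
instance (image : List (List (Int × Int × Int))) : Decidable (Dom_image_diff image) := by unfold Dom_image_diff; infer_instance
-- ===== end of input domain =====

-- B rewrites A's stateful row-major scan (threaded prev_row dict over enumerate(image[::-1]))
-- as one stateless dict comprehension: keep a cell iff it differs from the nearest lower row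
-- having that column; objective: simpler (not faster).

-- ===== PORT A =====
-- inner loop body: 'if not prev_row.get(dx) == col: prev_row[dx] = diff[key][dx] = col'
def pvAInner (key : Int)
    (st : PySem.Dict Int (PySem.Dict Int (Int × Int × Int)) × PySem.Dict Int (Int × Int × Int))
    (q : Int × (Int × Int × Int)) :
    PySem.Dict Int (PySem.Dict Int (Int × Int × Int)) × PySem.Dict Int (Int × Int × Int) :=
  if st.2.get? q.1 ≠ some q.2 then
    (st.1.modify key PySem.Dict.empty (fun rd => rd.insert q.1 q.2), st.2.insert q.1 q.2)
  else st

-- outer loop body: 'diff[len(image)-dy-1] = {}; for dx, col in enumerate(row): …'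
def pvAOuter (n : Int)
    (st : PySem.Dict Int (PySem.Dict Int (Int × Int × Int)) × PySem.Dict Int (Int × Int × Int))
    (p : Int × List (Int × Int × Int)) :
    PySem.Dict Int (PySem.Dict Int (Int × Int × Int)) × PySem.Dict Int (Int × Int × Int) :=
  (PySem.List.enumerate p.2).foldl (pvAInner (n - p.1 - 1))
    (st.1.insert (n - p.1 - 1) PySem.Dict.empty, st.2)

def image_diff (image : List (List (Int × Int × Int))) : List (Int × List (Int × Int × Int × Int)) :=
  let n : Int := image.length
  let fin :=
    (PySem.List.enumerate ((PySem.List.slice? image none none (-1)).getD [])).foldl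
      (pvAOuter n)
      ((PySem.Dict.empty : PySem.Dict Int (PySem.Dict Int (Int × Int × Int))),
       (PySem.Dict.empty : PySem.Dict Int (Int × Int × Int)))
  fin.1.items.map (fun p => (p.1, p.2.items))

-- ===== PORT B =====
-- 'next((row[c] for row in image[r+1:] if c < len(row)), None)'
def pvBelow (image : List (List (Int × Int × Int))) (r c : Int) : Option (Int × Int × Int) :=
  ((PySem.List.slice image (some (r + 1)) none).find?
      (fun row => decide (c < (row.length : Int)))).bind
    (fun row => PySem.List.pyGet? row c)

def image_diff_alt (image : List (List (Int × Int × Int))) : List (Int × List (Int × Int × Int × Int)) :=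
  (PySem.List.enumerate image).reverse.map
    (fun p => (p.1, (PySem.List.enumerate p.2).filter
        (fun q => decide (some q.2 ≠ pvBelow image p.1 q.1))))

-- ===== PRECONDITION & SPEC =====
def Spec_image_diff (image : List (List (Int × Int × Int))) (out : List (Int × List (Int × Int × Int × Int))) : Prop := out = image_diff_alt image
instance (image : List (List (Int × Int × Int))) (out : List (Int × List (Int × Int × Int × Int))) : Decidable (Spec_image_diff image out) := by unfold Spec_image_diff; infer_instance

-- ===== CLAIM (what is proved, stated in full; the proofs are below) =====
def Claim_equal_image_diff : Prop := ∀ (image : List (List (Int × Int × Int))), Dom_image_diff image → Spec_image_diff image (image_diff image)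

-- ===== LEMMAS AND PROOFS =====

-- proof-side descriptions of the two loops
def pvPrevFold (ps : List (Int × (Int × Int × Int))) (prev : PySem.Dict Int (Int × Int × Int)) :
    PySem.Dict Int (Int × Int × Int) :=
  ps.foldl (fun pr q => if pr.get? q.1 ≠ some q.2 then pr.insert q.1 q.2 else pr) prev

def pvUpdRow (row : List (Int × Int × Int)) (f : Int → Option (Int × Int × Int)) :
    Int → Option (Int × Int × Int) :=
  fun c => (((PySem.List.enumerate row).find? (fun q => q.1 == c)).map (·.2)).or (f c)

def pvOutAD : List (List (Int × Int × Int)) → Int → (Int → Option (Int × Int × Int)) →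
    List (Int × PySem.Dict Int (Int × Int × Int))
  | [], _, _ => []
  | row :: rest, k, f =>
      (k, PySem.Dict.mk ((PySem.List.enumerate row).filter (fun q => decide (f q.1 ≠ some q.2))))
        :: pvOutAD rest (k - 1) (pvUpdRow row f)

def pvBel (L : List (List (Int × Int × Int))) (c : Int) : Option (Int × Int × Int) :=
  (L.find? (fun row => decide (c < (row.length : Int)))).bind (fun row => PySem.List.pyGet? row c)

def pvBside (rl ctx : List (List (Int × Int × Int))) (k s : Int) :
    List (Int × List (Int × Int × Int × Int)) :=
  (PySem.List.enumerate rl s).map (fun p =>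
    (k + s - p.1, (PySem.List.enumerate p.2).filter
        (fun q => decide (some q.2 ≠ pvBel ((rl.take (p.1 - s).toNat).reverse ++ ctx) q.1))))

-- pyGet? on a nonnegative in-range / out-of-range index
lemma pvGet_lt (row : List (Int × Int × Int)) (c : Int) (h0 : 0 ≤ c) (h1 : c < (row.length : Int)) :
    (PySem.List.pyGet? row c).isSome := by
  have h2 : PySem.List.pyIdx? row.length c = some c.toNat := by
    simp [PySem.List.pyIdx?, h0, h1]
  simp [PySem.List.pyGet?, h2]
  omega

lemma pvGet_ge (row : List (Int × Int × Int)) (c : Int) (h : (row.length : Int) ≤ c) :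
    PySem.List.pyGet? row c = none := by
  have h0 : 0 ≤ c := le_trans (by positivity) h
  have h2 : PySem.List.pyIdx? row.length c = none := by
    simp [PySem.List.pyIdx?, h0]; omega
  simp [PySem.List.pyGet?, h2]

lemma pvGet_cons (v : Int × Int × Int) (vs : List (Int × Int × Int)) (c : Int) (h : 1 ≤ c) :
    PySem.List.pyGet? (v :: vs) c = PySem.List.pyGet? vs (c - 1) := by
  by_cases hlt : c < ((v :: vs).length : Int)
  · have hl : ((v :: vs).length : Int) = (vs.length : Int) + 1 := by simp
    have h1 : PySem.List.pyIdx? (v :: vs).length c = some c.toNat := by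
      simp only [PySem.List.pyIdx?, if_pos (by omega : (0:Int) ≤ c)]
      rw [if_pos (by omega)]
    have h2 : PySem.List.pyIdx? vs.length (c - 1) = some (c - 1).toNat := by
      simp only [PySem.List.pyIdx?, if_pos (by omega : (0:Int) ≤ c - 1)]
      rw [if_pos (by omega)]
    have hc : c.toNat = (c - 1).toNat + 1 := by omega
    simp only [PySem.List.pyGet?, h1, h2, Option.bind_some]
    rw [hc, List.getElem?_cons_succ]
  · have hl : ((v :: vs).length : Int) = (vs.length : Int) + 1 := by simp
    have h1 : PySem.List.pyIdx? (v :: vs).length c = none := by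
      simp only [PySem.List.pyIdx?, if_pos (by omega : (0:Int) ≤ c)]
      rw [if_neg (by omega)]
    have h2 : PySem.List.pyIdx? vs.length (c - 1) = none := by
      simp only [PySem.List.pyIdx?, if_pos (by omega : (0:Int) ≤ c - 1)]
      rw [if_neg (by omega)]
    simp only [PySem.List.pyGet?]; rw [h1, h2]; rfl

-- find? over an enumerate: lookup of a column index
lemma pvFindEnum (row : List (Int × Int × Int)) : ∀ (s c : Int),
    (((PySem.List.enumerate row s).find? (fun q => q.1 == c)).map (·.2))
      = if s ≤ c then PySem.List.pyGet? row (c - s) else none := by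
  induction row with
  | nil =>
      intro s c
      simp [PySem.List.enumerate_nil, PySem.List.pyGet?, PySem.List.pyIdx?]
  | cons v vs ih =>
      intro s c
      rw [PySem.List.enumerate_cons, List.find?_cons]
      by_cases he : s = c
      · subst he
        simp [PySem.List.pyGet?, PySem.List.pyIdx?]
      · have hne : ((s, v).1 == c) = false := by simp [he]
        rw [hne, ih (s + 1) c]
        by_cases hs : s ≤ c
        · have h1 : 1 ≤ c - s := by omega
          rw [if_pos (by omega), if_pos hs, pvGet_cons v vs (c - s) h1]
          ring_nf
        · rw [if_neg (by omega), if_neg hs]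

-- get? at the last (fresh) key
lemma pvGetLast (base : List (Int × PySem.Dict Int (Int × Int × Int))) (key : Int)
    (rd : PySem.Dict Int (Int × Int × Int)) (hk : key ∉ base.map (·.1)) :
    (PySem.Dict.mk (base ++ [(key, rd)])).get? key = some rd := by
  induction base with
  | nil => simp [PySem.Dict.get?_mk_cons]
  | cons e rest ih =>
      have h1 : key ≠ e.1 := fun h => hk (by simp [h])
      have h2 : key ∉ rest.map (·.1) := fun h => hk (by simp; right; simpa using h)
      rw [List.cons_append, PySem.Dict.get?_mk_cons, if_neg (by simpa using (Ne.symm h1))]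
      exact ih h2

-- modify at the last (fresh) key rewrites only that entry
lemma pvModifyLast (base : List (Int × PySem.Dict Int (Int × Int × Int))) (key : Int)
    (rd d0 : PySem.Dict Int (Int × Int × Int)) (g : PySem.Dict Int (Int × Int × Int) → PySem.Dict Int (Int × Int × Int))
    (hk : key ∉ base.map (·.1)) :
    (PySem.Dict.mk (base ++ [(key, rd)])).modify key d0 g = PySem.Dict.mk (base ++ [(key, g rd)]) := by
  have hget : (PySem.Dict.mk (base ++ [(key, rd)])).getD key d0 = rd :=
    PySem.Dict.getD_of_get?_eq_some _ d0 (pvGetLast base key rd hk)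
  have hcont : (PySem.Dict.mk (base ++ [(key, rd)])).contains key = true := by
    rw [PySem.Dict.contains_eq_isSome_get?, pvGetLast base key rd hk]; rfl
  rw [PySem.Dict.modify, hget]
  apply PySem.Dict.ext
  rw [PySem.Dict.items_insert_of_contains _ _ hcont]
  show (base ++ [(key, rd)]).map _ = _
  rw [List.map_append]
  congr 1
  · conv_rhs => rw [← List.map_id base]
    apply List.map_congr_left
    intro p hp
    have : (p.1 == key) = false := by
      simp only [beq_eq_false_iff_ne, ne_eq]
      intro h; exact hk (by simpa [h] using List.mem_map_of_mem hp (f := (·.1)))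
    simp [this]
  · simp

-- the inner loop of A, described: appends the recorded cells to the last entry
lemma pvInner (ps : List (Int × (Int × Int × Int))) :
    ∀ (base : List (Int × PySem.Dict Int (Int × Int × Int))) (key : Int)
      (acc : List (Int × (Int × Int × Int))) (prev : PySem.Dict Int (Int × Int × Int)),
      key ∉ base.map (·.1) →
      ps.Pairwise (fun a b => a.1 ≠ b.1) →
      (∀ q ∈ ps, ∀ x ∈ acc, x.1 ≠ q.1) →
      ps.foldl (pvAInner key) (PySem.Dict.mk (base ++ [(key, PySem.Dict.mk acc)]), prev)
        = (PySem.Dict.mk (base ++ [(key, PySem.Dict.mk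
              (acc ++ ps.filter (fun q => decide (prev.get? q.1 ≠ some q.2))))]),
           pvPrevFold ps prev) := by
  induction ps with
  | nil => intro base key acc prev hk hp hacc; simp [pvPrevFold]
  | cons q rest ih =>
      intro base key acc prev hk hp hacc
      have hq1 : q.1 ∉ acc.map (·.1) := by
        intro hm
        obtain ⟨x, hx, hx1⟩ := List.mem_map.mp hm
        exact hacc q (List.mem_cons_self) x hx hx1
      rw [List.foldl_cons]
      by_cases h : prev.get? q.1 = some q.2
      · have hstep : pvAInner key (PySem.Dict.mk (base ++ [(key, PySem.Dict.mk acc)]), prev) q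
            = (PySem.Dict.mk (base ++ [(key, PySem.Dict.mk acc)]), prev) := by
          simp [pvAInner, h]
        rw [hstep, ih base key acc prev hk (List.Pairwise.of_cons hp)
          (fun q' hq' x hx => hacc q' (List.mem_cons_of_mem _ hq') x hx)]
        have hcond : (fun (q' : Int × (Int × Int × Int)) => decide (prev.get? q'.1 ≠ some q'.2)) q = false := by
          simp [h]
        rw [List.filter_cons_of_neg (by simpa using hcond)]
        have : pvPrevFold (q :: rest) prev = pvPrevFold rest prev := by
          simp [pvPrevFold, h]
        rw [this]
      · have hins : (PySem.Dict.mk acc).insert q.1 q.2 = PySem.Dict.mk (acc ++ [(q.1, q.2)]) := by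
          have hcnt : (PySem.Dict.mk acc).contains q.1 = false := by
            rw [PySem.Dict.contains_eq_decide_mem_keys, PySem.Dict.keys_mk]
            simpa using hq1
          apply PySem.Dict.ext
          rw [PySem.Dict.items_insert_of_not_contains _ _ hcnt]
        have hstep : pvAInner key (PySem.Dict.mk (base ++ [(key, PySem.Dict.mk acc)]), prev) q
            = (PySem.Dict.mk (base ++ [(key, PySem.Dict.mk (acc ++ [(q.1, q.2)]))]), prev.insert q.1 q.2) := by
          simp only [pvAInner, if_pos (by simpa using h)]
          rw [pvModifyLast base key _ _ _ hk, hins]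
        rw [hstep, ih base key (acc ++ [(q.1, q.2)]) (prev.insert q.1 q.2) hk
          (List.Pairwise.of_cons hp)
          (by
            intro q' hq' x hx hx1
            rcases List.mem_append.mp hx with hx | hx
            · exact hacc q' (List.mem_cons_of_mem _ hq') x hx hx1
            · have : x = (q.1, q.2) := by simpa using hx
              subst this
              exact (List.pairwise_cons.mp hp).1 q' hq' (by simpa using hx1))]
        have hfc : rest.filter (fun q' => decide ((prev.insert q.1 q.2).get? q'.1 ≠ some q'.2))
            = rest.filter (fun q' => decide (prev.get? q'.1 ≠ some q'.2)) := by
          apply List.filter_congr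
          intro q' hq'
          have hne : q'.1 ≠ q.1 := Ne.symm ((List.pairwise_cons.mp hp).1 q' hq')
          rw [PySem.Dict.get?_insert, if_neg hne]
        have hpv : pvPrevFold (q :: rest) prev = pvPrevFold rest (prev.insert q.1 q.2) := by
          simp [pvPrevFold, h]
        rw [hfc, hpv, List.filter_cons_of_pos (by simpa using h), List.append_assoc]
        rfl

-- final prev lookup after one row
lemma pvPrevFoldGet (ps : List (Int × (Int × Int × Int))) :
    ∀ (prev : PySem.Dict Int (Int × Int × Int)), ps.Pairwise (fun a b => a.1 ≠ b.1) →
      ∀ c, (pvPrevFold ps prev).get? c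
        = ((ps.find? (fun q => q.1 == c)).map (·.2)).or (prev.get? c) := by
  induction ps with
  | nil => intro prev hp c; simp [pvPrevFold]
  | cons q rest ih =>
      intro prev hp c
      have hrest : ∀ q' ∈ rest, q'.1 ≠ q.1 := fun q' hq' => Ne.symm ((List.pairwise_cons.mp hp).1 q' hq')
      by_cases hc : q.1 = c
      · subst hc
        have hfind : rest.find? (fun q' => q'.1 == q.1) = none :=
          List.find?_eq_none.mpr (fun q' hq' => by simpa using hrest q' hq')
        by_cases h : prev.get? q.1 = some q.2
        · have : pvPrevFold (q :: rest) prev = pvPrevFold rest prev := by simp [pvPrevFold, h]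
          rw [this, ih prev (List.Pairwise.of_cons hp) q.1, hfind, List.find?_cons_of_pos (by simp)]
          simp [h]
        · have : pvPrevFold (q :: rest) prev = pvPrevFold rest (prev.insert q.1 q.2) := by
            simp [pvPrevFold, h]
          rw [this, ih _ (List.Pairwise.of_cons hp) q.1, hfind, List.find?_cons_of_pos (by simp)]
          simp
      · have hstep : List.find? (fun q' => q'.1 == c) (q :: rest) = rest.find? (fun q' => q'.1 == c) :=
          List.find?_cons_of_neg (by simpa using hc)
        by_cases h : prev.get? q.1 = some q.2
        · have : pvPrevFold (q :: rest) prev = pvPrevFold rest prev := by simp [pvPrevFold, h]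
          rw [this, ih prev (List.Pairwise.of_cons hp) c, hstep]
        · have : pvPrevFold (q :: rest) prev = pvPrevFold rest (prev.insert q.1 q.2) := by
            simp [pvPrevFold, h]
          rw [this, ih _ (List.Pairwise.of_cons hp) c, hstep, PySem.Dict.get?_insert,
            if_neg (fun hh => hc hh.symm)]

-- the outer loop of A, described by pvOutAD
lemma pvOuter (rl : List (List (Int × Int × Int))) :
    ∀ (n s : Int) (entries : List (Int × PySem.Dict Int (Int × Int × Int)))
      (prev : PySem.Dict Int (Int × Int × Int)),
      (∀ x ∈ entries.map (·.1), n - s - 1 < x) →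
      ((PySem.List.enumerate rl s).foldl (pvAOuter n) (PySem.Dict.mk entries, prev)).1
        = PySem.Dict.mk (entries ++ pvOutAD rl (n - s - 1) (fun c => prev.get? c)) := by
  induction rl with
  | nil => intro n s entries prev hk; simp [PySem.List.enumerate_nil, pvOutAD]
  | cons row rest ih =>
      intro n s entries prev hk
      have hpair : (PySem.List.enumerate row).Pairwise (fun a b => a.1 ≠ b.1) :=
        (PySem.List.pairwise_lt_enumerate row 0).imp (fun h => ne_of_lt h)
      have hkey_notin : (n - s - 1) ∉ entries.map (·.1) := fun hm => absurd (hk _ hm) (lt_irrefl _)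
      have hcnt : (PySem.Dict.mk entries).contains (n - s - 1) = false := by
        rw [PySem.Dict.contains_eq_decide_mem_keys, PySem.Dict.keys_mk]
        simpa using hkey_notin
      have hins : (PySem.Dict.mk entries).insert (n - s - 1) PySem.Dict.empty
          = PySem.Dict.mk (entries ++ [(n - s - 1, PySem.Dict.mk [])]) := by
        apply PySem.Dict.ext
        rw [PySem.Dict.items_insert_of_not_contains _ _ hcnt]
        rfl
      have hstep : pvAOuter n (PySem.Dict.mk entries, prev) (s, row)
          = (PySem.Dict.mk (entries ++ [(n - s - 1, PySem.Dict.mk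
                ([] ++ (PySem.List.enumerate row).filter (fun q => decide (prev.get? q.1 ≠ some q.2))))]),
             pvPrevFold (PySem.List.enumerate row) prev) := by
        show (PySem.List.enumerate row).foldl (pvAInner (n - s - 1))
            ((PySem.Dict.mk entries).insert (n - s - 1) PySem.Dict.empty, prev) = _
        rw [hins]
        exact pvInner (PySem.List.enumerate row) entries (n - s - 1) [] prev hkey_notin hpair
          (by intro q hq x hx; simp at hx)
      rw [PySem.List.enumerate_cons, List.foldl_cons, hstep,
        ih n (s + 1) _ _ (by
          intro x hx
          rw [List.map_append] at hx
          rcases List.mem_append.mp hx with hx' | hx'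
          · have := hk x hx'; omega
          · have : x = n - s - 1 := by simpa using hx'
            omega)]
      have hfun : (fun c => (pvPrevFold (PySem.List.enumerate row) prev).get? c)
          = pvUpdRow row (fun c => prev.get? c) := by
        funext c
        exact pvPrevFoldGet (PySem.List.enumerate row) prev hpair c
      rw [hfun]
      have hkk : n - (s + 1) - 1 = n - s - 1 - 1 := by ring
      rw [hkk]
      simp [pvOutAD, List.append_assoc]

-- reversing an enumerate relabels indices
lemma pvEnumRev (l : List (List (Int × Int × Int))) :
    (PySem.List.enumerate l).reverse
      = (PySem.List.enumerate l.reverse).map (fun p => ((l.length : Int) - 1 - p.1, p.2)) := by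
  apply List.ext_getElem
  · simp [PySem.List.length_enumerate]
  · intro i h1 h2
    have hlen : (PySem.List.enumerate l).length = l.length := PySem.List.length_enumerate l 0
    have hi : i < l.length := by simpa [PySem.List.length_enumerate] using h1
    rw [List.getElem_reverse, List.getElem_map, PySem.List.getElem_enumerate,
      PySem.List.getElem_enumerate, List.getElem_reverse]
    simp only [hlen, Prod.mk.injEq]
    refine ⟨by omega, trivial⟩

-- the bridge: A's threaded state, unrolled, is B's stateless per-cell rule
lemma pvBridge (rl : List (List (Int × Int × Int))) :
    ∀ (ctx : List (List (Int × Int × Int))) (k s : Int) (f : Int → Option (Int × Int × Int)),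
      (∀ c : Int, 0 ≤ c → f c = pvBel ctx c) →
      (pvOutAD rl k f).map (fun p => (p.1, p.2.items)) = pvBside rl ctx k s := by
  induction rl with
  | nil => intro ctx k s f hf; simp [pvOutAD, pvBside, PySem.List.enumerate_nil]
  | cons row rest ih =>
      intro ctx k s f hf
      have hf' : ∀ c : Int, 0 ≤ c → pvUpdRow row f c = pvBel (row :: ctx) c := by
        intro c h0
        have hbel : pvBel (row :: ctx) c
            = if c < (row.length : Int) then PySem.List.pyGet? row c else pvBel ctx c := by
          by_cases hlt : c < (row.length : Int)
          · rw [if_pos hlt]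
            unfold pvBel
            rw [List.find?_cons_of_pos (by simpa using hlt)]
            rfl
          · rw [if_neg hlt]
            unfold pvBel
            rw [List.find?_cons_of_neg (by simpa using hlt)]
        rw [hbel]
        unfold pvUpdRow
        rw [pvFindEnum row 0 c, if_pos h0, show c - 0 = c from by ring]
        by_cases hlt : c < (row.length : Int)
        · rw [if_pos hlt]
          obtain ⟨v, hv⟩ := Option.isSome_iff_exists.mp (pvGet_lt row c h0 hlt)
          rw [hv]
          rfl
        · rw [if_neg hlt, pvGet_ge row c (by omega), Option.none_or]
          exact hf c h0
      simp only [pvOutAD, List.map_cons]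
      rw [ih (row :: ctx) (k - 1) (s + 1) (pvUpdRow row f) hf']
      unfold pvBside
      rw [PySem.List.enumerate_cons, List.map_cons]
      congr 1
      · -- the head entries agree
        have h1 : k + s - s = k := by ring
        rw [h1]
        have h2 : ((s : Int) - s).toNat = 0 := by simp
        simp only [h2, List.take_zero, List.reverse_nil, List.nil_append]
        congr 1
        show (PySem.List.enumerate row).filter (fun q => decide (f q.1 ≠ some q.2))
          = (PySem.List.enumerate row).filter (fun q => decide (some q.2 ≠ pvBel ctx q.1))
        apply List.filter_congr
        intro q hq
        obtain ⟨kk, hkk, rfl⟩ := (PySem.List.mem_enumerate_iff row 0 q).mp hq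
        rw [decide_eq_decide, hf _ (by positivity)]
        exact ne_comm
      · -- the tails agree
        apply List.map_congr_left
        intro p hp
        obtain ⟨kk, hkk, rfl⟩ := (PySem.List.mem_enumerate_iff rest (s + 1) p).mp hp
        have ht : ((s + 1 + (kk : Int)) - s).toNat = ((s + 1 + (kk : Int)) - (s + 1)).toNat + 1 := by
          omega
        congr 1
        · ring
        · have hctx : (((row :: rest).take (((s + 1 + (kk : Int)) - s).toNat)).reverse ++ ctx)
              = ((rest.take (((s + 1 + (kk : Int)) - (s + 1)).toNat)).reverse ++ (row :: ctx)) := by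
            rw [ht, List.take_succ_cons, List.reverse_cons, List.append_assoc]
            rfl
          rw [hctx]

-- ===== VERDICT (by name: the statement is the Claim_ definition above) =====
theorem image_diff_spec : Claim_equal_image_diff := by
  intro image _
  unfold Spec_image_diff
  show image_diff image = image_diff_alt image
  have hrev : (PySem.List.slice? image none none (-1)).getD [] = image.reverse := by
    rw [PySem.List.slice?_none_none_neg_one]
    rfl
  have he : (PySem.Dict.empty : PySem.Dict Int (PySem.Dict Int (Int × Int × Int)))
      = PySem.Dict.mk [] := rfl
  have hout := pvOuter image.reverse ((image.length : Int)) 0 []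
    (PySem.Dict.empty : PySem.Dict Int (Int × Int × Int)) (by intro x hx; simp at hx)
  have hf0 : ∀ c : Int, 0 ≤ c →
      (PySem.Dict.empty : PySem.Dict Int (Int × Int × Int)).get? c = pvBel [] c := by
    intro c _
    rw [PySem.Dict.get?_empty]
    rfl
  have hbridge := pvBridge image.reverse [] ((image.length : Int) - 0 - 1) 0
    (fun c => (PySem.Dict.empty : PySem.Dict Int (Int × Int × Int)).get? c) hf0
  simp only [image_diff]
  rw [hrev, he, hout]
  simp only [List.nil_append]
  rw [hbridge]
  -- now identify pvBside with B's comprehension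
  unfold image_diff_alt
  rw [pvEnumRev image, List.map_map]
  unfold pvBside
  apply List.map_congr_left
  intro p hp
  obtain ⟨kk, hkk, rfl⟩ := (PySem.List.mem_enumerate_iff image.reverse 0 p).mp hp
  have hklen : kk < image.length := by simpa using hkk
  have hBel : ∀ c : Int,
      pvBelow image ((image.length : Int) - 1 - (0 + (kk : Int))) c
        = pvBel ((image.reverse.take (((0 + (kk : Int)) - 0).toNat)).reverse ++ []) c := by
    intro c
    have ha : (0 : Int) ≤ (image.length : Int) - 1 - (0 + (kk : Int)) + 1 := by omega
    have hsl : PySem.List.slice image (some ((image.length : Int) - 1 - (0 + (kk : Int)) + 1)) none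
        = image.drop (((image.length : Int) - 1 - (0 + (kk : Int)) + 1).toNat) :=
      PySem.List.slice_from image ha
    have hdrop : image.drop (((image.length : Int) - 1 - (0 + (kk : Int)) + 1).toNat)
        = (image.reverse.take (((0 + (kk : Int)) - 0).toNat)).reverse := by
      have h1 : image.reverse.reverse.drop (((image.length : Int) - 1 - (0 + (kk : Int)) + 1).toNat)
          = (image.reverse.take (image.reverse.length - (((image.length : Int) - 1 - (0 + (kk : Int)) + 1).toNat))).reverse :=
        List.drop_reverse
      rw [List.reverse_reverse] at h1
      rw [h1]
      congr 2
      simp only [List.length_reverse]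
      omega
    unfold pvBelow pvBel
    rw [hsl, hdrop, List.append_nil]
  simp only [Function.comp_apply, hBel, List.append_nil]
  congr 1
  omega
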